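-- pv_equiv track=rewrite | github.com/ankur-gos/RE-Flex | reflex/context_qa_completion.py | batchify
-- ===== SOURCE A (Python) =====
-- def batchify(data, batch_size):
--     msg = ""
--     list_samples_batches = []
--     list_sentences_batches = []
--     current_samples_batch = []
--     current_sentences_batches = []
--     c = 0
--
--     # sort to group togheter sentences with similar length
--     for sample in sorted(
--         data, key=lambda k: len(" ".join(k["masked_sentences"]).split())
--     ):
--         masked_sentences = sample["masked_sentences"]
--         current_samples_batch.append(sample)
--         current_sentences_batches.append(masked_sentences)
--         c += 1
--         if c >= batch_size:
--             list_samples_batches.append(current_samples_batch)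
--             list_sentences_batches.append(current_sentences_batches)
--             current_samples_batch = []
--             current_sentences_batches = []
--             c = 0
--
--     # last batch
--     if current_samples_batch and len(current_samples_batch) > 0:
--         list_samples_batches.append(current_samples_batch)
--         list_sentences_batches.append(current_sentences_batches)
--
--     return list_samples_batches, list_sentences_batches, msg
-- ===== SOURCE B (Python) =====
-- def batchify(data, batch_size):
--     sorted_data = sorted(
--         data, key=lambda k: len(" ".join(k["masked_sentences"]).split())
--     )
--     bs = batch_size if batch_size > 0 else 1
--     list_samples_batches = []
--     rest = sorted_data
--     while rest:
--         list_samples_batches.append(rest[:bs])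
--         rest = rest[bs:]
--     list_sentences_batches = [
--         [s["masked_sentences"] for s in chunk] for chunk in list_samples_batches
--     ]
--     return list_samples_batches, list_sentences_batches, ""
-- ===== Notes on version B (the rewrite author's own statement) =====
-- stated objective: simpler
-- what changed: B sorts once and then slices the sorted list into chunks of size max(batch_size,1) by repeated take/drop, deriving the sentence batches by a map over the finished chunks, instead of A's single element-by-element loop that maintains two current-batch accumulators and a counter and flushes a trailing partial batch.
-- outside the precondition, e.g. on batchify([{'other': ['a']}], 2): A raises KeyError, B raises KeyError
import Mathlib
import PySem

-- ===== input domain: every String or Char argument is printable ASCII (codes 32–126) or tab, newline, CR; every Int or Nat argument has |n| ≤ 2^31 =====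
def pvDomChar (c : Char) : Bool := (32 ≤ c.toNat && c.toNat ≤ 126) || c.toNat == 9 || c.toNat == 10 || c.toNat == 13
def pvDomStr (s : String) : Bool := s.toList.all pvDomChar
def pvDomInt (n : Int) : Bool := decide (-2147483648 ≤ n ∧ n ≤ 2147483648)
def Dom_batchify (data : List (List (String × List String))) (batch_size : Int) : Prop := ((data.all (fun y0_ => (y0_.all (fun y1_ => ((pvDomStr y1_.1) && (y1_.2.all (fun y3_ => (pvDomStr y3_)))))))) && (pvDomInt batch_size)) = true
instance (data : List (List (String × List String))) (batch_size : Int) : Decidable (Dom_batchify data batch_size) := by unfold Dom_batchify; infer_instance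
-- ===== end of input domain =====

-- B replaces A's element-counting accumulator loop by one take/drop chunking pass over
-- the sorted list plus a map for the sentences (objective: simpler; same cost).


-- ===== PORT A =====
-- sample["masked_sentences"]: first-match lookup in the association list; `.getD []`
-- is only reached when the key is absent, which Pre_batchify excludes (Python: KeyError).
def pvMs (sample : List (String × List String)) : List String :=
  ((sample.find? (fun p => p.1 == "masked_sentences")).map (·.2)).getD []

-- the sort key: len(" ".join(k["masked_sentences"]).split())
def pvKey (sample : List (String × List String)) : Nat :=
  (PySem.Str.split₀ (PySem.Str.join " " (pvMs sample))).length

-- one iteration of A's for-loop; state = (list_samples_batches, list_sentences_batches,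
-- current_samples_batch, current_sentences_batches, c)
def pvStepA (batch_size : Int)
    (st : List (List (List (String × List String))) × List (List (List String)) ×
          List (List (String × List String)) × List (List String) × Int)
    (sample : List (String × List String)) :
    List (List (List (String × List String))) × List (List (List String)) ×
    List (List (String × List String)) × List (List String) × Int :=
  let masked_sentences := pvMs sample
  let csb := st.2.2.1 ++ [sample]
  let cseb := st.2.2.2.1 ++ [masked_sentences]
  let c := st.2.2.2.2 + 1
  if batch_size ≤ c then (st.1 ++ [csb], st.2.1 ++ [cseb], [], [], 0)
  else (st.1, st.2.1, csb, cseb, c)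

def batchify (data : List (List (String × List String))) (batch_size : Int) : (List (List (List (String × List String)))) × List (List (List String)) × String :=
  let msg := ""
  let st := (PySem.List.sorted data pvKey false).foldl (pvStepA batch_size) ([], [], [], [], (0 : Int))
  -- last batch: `if current_samples_batch and len(current_samples_batch) > 0`
  if st.2.2.1 ≠ [] ∧ st.2.2.1.length > 0 then (st.1 ++ [st.2.2.1], st.2.1 ++ [st.2.2.2.1], msg)
  else (st.1, st.2.1, msg)

-- ===== PORT B =====
-- the while loop of Source B: append rest[:bs], continue with rest[bs:]; bs = m+1 ≥ 1
def pvChunkLoop {α : Type} (m : Nat) (acc : List (List α)) (rest : List α) : List (List α) :=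
  if rest = [] then acc
  else pvChunkLoop m (acc ++ [rest.take (m + 1)]) (rest.drop (m + 1))
termination_by rest.length
decreasing_by cases rest with
  | nil => simp_all
  | cons x t => simp

def batchify_alt (data : List (List (String × List String))) (batch_size : Int) : (List (List (List (String × List String)))) × List (List (List String)) × String :=
  let sorted_data := PySem.List.sorted data pvKey false
  let bs : Int := if batch_size > 0 then batch_size else 1
  let list_samples_batches := pvChunkLoop (bs.toNat - 1) [] sorted_data
  (list_samples_batches, list_samples_batches.map (fun chunk => chunk.map pvMs), "")

-- ===== PRECONDITION & SPEC =====
-- Pre_ excludes samples lacking the "masked_sentences" key, on which Python A (and B) raise KeyError.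
def Pre_batchify (data : List (List (String × List String))) (batch_size : Int) : Prop :=
  data.all (fun s => s.any (fun p => p.1 == "masked_sentences")) = true
instance (data : List (List (String × List String))) (batch_size : Int) : Decidable (Pre_batchify data batch_size) := by unfold Pre_batchify; infer_instance

def pvWitness_batchify : (List (List (String × List String))) × Int :=
  ([[("masked_sentences", ["a b", "c"])], [("masked_sentences", ["d"])]], 2)

def Spec_batchify (data : List (List (String × List String))) (batch_size : Int) (out : (List (List (List (String × List String)))) × List (List (List String)) × String) : Prop := out = batchify_alt data batch_size
instance (data : List (List (String × List String))) (batch_size : Int) (out : (List (List (List (String × List String)))) × List (List (List String)) × String) : Decidable (Spec_batchify data batch_size out) := by unfold Spec_batchify; infer_instance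

-- ===== CLAIM (what is proved, stated in full; the proofs are below) =====
def Claim_equal_batchify : Prop := ∀ (data : List (List (String × List String))) (batch_size : Int), Dom_batchify data batch_size → Pre_batchify data batch_size → Spec_batchify data batch_size (batchify data batch_size)

-- ===== LEMMAS AND PROOFS =====

-- reference chunking: chunks of size m+1, front to back
def pvChunks {α : Type} (m : Nat) (xs : List α) : List (List α) :=
  if xs = [] then []
  else xs.take (m + 1) :: pvChunks m (xs.drop (m + 1))
termination_by xs.length
decreasing_by cases xs with
  | nil => simp_all
  | cons x t => simp

theorem pvChunkLoop_eq {α : Type} (m : Nat) (acc : List (List α)) (rest : List α) :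
    pvChunkLoop m acc rest = acc ++ pvChunks m rest := by
  induction acc, rest using pvChunkLoop.induct m with
  | case1 acc => simp [pvChunkLoop, pvChunks]
  | case2 acc rest h ih =>
      rw [pvChunkLoop, pvChunks, if_neg h, if_neg h, ih]
      simp

-- A's loop while no batch boundary is reached: it only accumulates
theorem pvFill (bs : Int) (N : Nat)
    (hbsN : ∀ c : Nat, bs ≤ (c : Int) + 1 ↔ (N : Int) ≤ (c : Int) + 1)
    (ys : List (List (String × List String))) :
    ∀ (csb : List (List (String × List String))) (cseb : List (List String))
      (lsb : List (List (List (String × List String)))) (lseb : List (List (List String))),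
      csb.length + ys.length < N →
      ys.foldl (pvStepA bs) (lsb, lseb, csb, cseb, (csb.length : Int)) =
        (lsb, lseb, csb ++ ys, cseb ++ ys.map pvMs, ((csb.length + ys.length : Nat) : Int)) := by
  induction ys with
  | nil => intro csb cseb lsb lseb _; simp
  | cons y t ih =>
      intro csb cseb lsb lseb hlt
      simp only [List.foldl_cons]
      have hcond : ¬ bs ≤ (csb.length : Int) + 1 := by
        rw [hbsN csb.length]
        simp at hlt ⊢
        omega
      rw [pvStepA, if_neg hcond]
      have key := ih (csb ++ [y]) (cseb ++ [pvMs y]) lsb lseb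
        (by simp at hlt ⊢; omega)
      have e1 : (((csb ++ [y]).length : Nat) : Int) = (csb.length : Int) + 1 := by
        simp
      rw [e1] at key
      rw [key]
      simp
      omega

-- A's loop + final flush computes exactly B's chunking
theorem pvMainA (bs : Int) (N : Nat) (hN : 1 ≤ N)
    (hbsN : ∀ c : Nat, bs ≤ (c : Int) + 1 ↔ (N : Int) ≤ (c : Int) + 1) :
    ∀ (n : Nat) (xs : List (List (String × List String))), xs.length ≤ n →
    ∀ (lsb : List (List (List (String × List String)))) (lseb : List (List (List String))),
      (let st := xs.foldl (pvStepA bs) (lsb, lseb, [], [], (0 : Int));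
       if st.2.2.1 ≠ [] ∧ st.2.2.1.length > 0 then (st.1 ++ [st.2.2.1], st.2.1 ++ [st.2.2.2.1], "")
       else (st.1, st.2.1, ("" : String))) =
      (lsb ++ pvChunks (N - 1) xs, lseb ++ (pvChunks (N - 1) xs).map (List.map pvMs), "") := by
  intro n
  induction n with
  | zero =>
      intro xs hxs lsb lseb
      have : xs = [] := by simpa using List.eq_nil_of_length_eq_zero (Nat.le_zero.mp hxs)
      subst this
      simp [pvChunks]
  | succ n ih =>
      intro xs hxs lsb lseb
      by_cases hnil : xs = []
      · subst hnil; simp [pvChunks]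
      by_cases hlt : xs.length < N
      · -- fewer than N elements: one partial batch flushed at the end
        have hfill := pvFill bs N hbsN xs [] [] lsb lseb (by simpa using hlt)
        simp only [List.nil_append, List.length_nil, Nat.cast_zero, Nat.zero_add] at hfill
        simp only [hfill]
        rw [pvChunks, if_neg hnil]
        have htake : xs.take (N - 1 + 1) = xs := List.take_of_length_le (by omega)
        have hdrop : xs.drop (N - 1 + 1) = [] := List.drop_eq_nil_of_le (by omega)
        rw [htake, hdrop, pvChunks]
        simp [hnil]
      · -- at least N elements: the first N form a full batch, recurse on the rest
        rw [Nat.not_lt] at hlt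
        obtain ⟨e, he⟩ : ∃ e, xs[N - 1]? = some e := by
          have : N - 1 < xs.length := by omega
          exact ⟨xs[N - 1], List.getElem?_eq_getElem this⟩
        have hsplit : xs = xs.take N ++ xs.drop N := (List.take_append_drop N xs).symm
        have htakeN : xs.take N = xs.take (N - 1) ++ [e] := by
          conv_lhs => rw [show N = (N - 1) + 1 by omega]
          rw [List.take_add_one, he]
          simp
        have hlen1 : (xs.take (N - 1)).length = N - 1 := by
          rw [List.length_take]; omega
        -- run the loop over the first N elements
        have hfill := pvFill bs N hbsN (xs.take (N - 1)) [] [] lsb lseb (by simp; omega)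
        simp only [List.nil_append, List.length_nil, Nat.cast_zero, Nat.zero_add] at hfill
        have hstep : pvStepA bs (lsb, lseb, xs.take (N - 1), (xs.take (N - 1)).map pvMs, ((xs.take (N - 1)).length : Int)) e =
            (lsb ++ [xs.take N], lseb ++ [(xs.take N).map pvMs], [], [], 0) := by
          rw [pvStepA]
          have hcond : bs ≤ ((xs.take (N - 1)).length : Int) + 1 := by
            rw [hbsN, hlen1]; omega
          rw [if_pos hcond]
          simp only [htakeN]
          simp
        have hfoldTake : (xs.take N).foldl (pvStepA bs) (lsb, lseb, [], [], (0 : Int)) =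
            (lsb ++ [xs.take N], lseb ++ [(xs.take N).map pvMs], [], [], (0 : Int)) := by
          conv_lhs => rw [htakeN]
          rw [List.foldl_append, hfill]
          simp only [List.foldl_cons, List.foldl_nil, hstep]
        have hfold : xs.foldl (pvStepA bs) (lsb, lseb, [], [], (0 : Int)) =
            (xs.drop N).foldl (pvStepA bs) (lsb ++ [xs.take N], lseb ++ [(xs.take N).map pvMs], [], [], (0 : Int)) := by
          conv_lhs => rw [hsplit]
          rw [List.foldl_append, hfoldTake]
        simp only [hfold]
        have ihd := ih (xs.drop N) (by rw [List.length_drop]; omega)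
          (lsb ++ [xs.take N]) (lseb ++ [(xs.take N).map pvMs])
        simp only [ihd]
        have hchx : pvChunks (N - 1) xs = xs.take N :: pvChunks (N - 1) (xs.drop N) := by
          rw [pvChunks, if_neg hnil, show N - 1 + 1 = N by omega]
        rw [hchx]
        simp

-- ===== VERDICT (by name: the statement is the Claim_ definition above) =====
theorem batchify_spec : Claim_equal_batchify := by
  intro data batch_size _ _
  unfold Spec_batchify batchify batchify_alt
  set s := PySem.List.sorted data pvKey false with hs
  set N : Nat := (if batch_size > 0 then batch_size else 1).toNat with hNdef
  have hN : 1 ≤ N := by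
    rw [hNdef]; split <;> omega
  have hbsN : ∀ c : Nat, batch_size ≤ (c : Int) + 1 ↔ (N : Int) ≤ (c : Int) + 1 := by
    intro c
    rw [hNdef]
    split <;> rename_i h
    · rw [Int.toNat_of_nonneg (by omega)]
    · constructor <;> intro <;> [skip; omega]
      · push_cast; omega
  have := pvMainA batch_size N hN hbsN s.length s le_rfl [] []
  simp only [List.nil_append] at this
  rw [this]
  simp only [pvChunkLoop_eq, List.nil_append, ← hNdef]
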